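-- pv_equiv track=rewrite | github.com/akshatgg/vibe_monitor-back | app/services/rca/get_service_name/service.py | _get_priority_files
-- ===== SOURCE A (Python) =====
-- from typing import List, Optional
--
-- LANGUAGE_FILES = {
--     "Python": ["main.py", "app.py", "server.py", "__init__.py"],
--     "JavaScript": ["index.js", "server.js", "app.js"],
--     "TypeScript": ["index.ts", "server.ts", "app.ts"],
--     "Go": ["main.go", "server.go"],
-- }
--
-- UNIVERSAL_FILES = ["Dockerfile", ".env", "package.json", "pyproject.toml"]
--
-- def _get_priority_files(files: List[str], language: Optional[str]) -> List[str]: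
--     """Get prioritized list of files to analyze"""
--     priority = []
--
--     # Add language-specific files
--     if language and language in LANGUAGE_FILES:
--         for f in LANGUAGE_FILES[language]:
--             if f in files:
--                 priority.append(f)
--
--     # Add universal files
--     for f in UNIVERSAL_FILES:
--         if f in files and f not in priority:
--             priority.append(f)
--
--     # Add remaining files
--     for f in files:
--         if f not in priority:
--             priority.append(f)
--
--     return priority
-- ===== SOURCE B (Python) =====
-- from typing import List, Optional
--
-- LANGUAGE_FILES = {
--     "Python": ["main.py", "app.py", "server.py", "__init__.py"],
--     "JavaScript": ["index.js", "server.js", "app.js"],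
--     "TypeScript": ["index.ts", "server.ts", "app.ts"],
--     "Go": ["main.go", "server.go"],
-- }
--
-- UNIVERSAL_FILES = ["Dockerfile", ".env", "package.json", "pyproject.toml"]
--
-- def _get_priority_files(files: List[str], language: Optional[str]) -> List[str]:
--     """Get prioritized list of files to analyze (rank-and-sort formulation)."""
--     deduped = list(dict.fromkeys(files))
--     lang_list = LANGUAGE_FILES.get(language, []) if language else []
--     n_lang, n_univ = len(lang_list), len(UNIVERSAL_FILES)
--     ranked = []
--     for i, f in enumerate(deduped):
--         if f in lang_list:
--             r = lang_list.index(f)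
--         elif f in UNIVERSAL_FILES:
--             r = n_lang + UNIVERSAL_FILES.index(f)
--         else:
--             r = n_lang + n_univ + i
--         ranked.append((r, f))
--     ranked.sort(key=lambda p: p[0])
--     return [f for _, f in ranked]
-- ===== Notes on version B (the rewrite author's own statement) =====
-- stated objective: faster
-- what changed: A's three accumulate-with-membership-scan passes are replaced by deduplicating once (dict.fromkeys), assigning each distinct file a numeric rank (language-list index, then universal-list index, then dedup position) and stably sorting by that rank.
import Mathlib
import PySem

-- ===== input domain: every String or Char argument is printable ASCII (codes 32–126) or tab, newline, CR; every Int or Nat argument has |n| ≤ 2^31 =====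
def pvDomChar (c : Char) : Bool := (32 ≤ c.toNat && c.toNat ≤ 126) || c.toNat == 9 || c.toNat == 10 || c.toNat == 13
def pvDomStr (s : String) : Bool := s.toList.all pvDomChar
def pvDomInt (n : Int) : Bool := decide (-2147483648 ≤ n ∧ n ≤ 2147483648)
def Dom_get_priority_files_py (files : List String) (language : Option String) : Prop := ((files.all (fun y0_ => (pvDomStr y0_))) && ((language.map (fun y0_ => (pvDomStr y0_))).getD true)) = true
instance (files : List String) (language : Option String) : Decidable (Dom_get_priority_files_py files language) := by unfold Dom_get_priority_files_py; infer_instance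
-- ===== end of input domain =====

-- B replaces A's three accumulating membership-scan passes by dedup + rank + stable sort (measured faster).

-- ===== PORT A =====
def pvLANG : PySem.Dict String (List String) := PySem.Dict.mk [
  ("Python", ["main.py", "app.py", "server.py", "__init__.py"]),
  ("JavaScript", ["index.js", "server.js", "app.js"]),
  ("TypeScript", ["index.ts", "server.ts", "app.ts"]),
  ("Go", ["main.go", "server.go"])]

def pvUNIV : List String := ["Dockerfile", ".env", "package.json", "pyproject.toml"]

def get_priority_files_py (files : List String) (language : Option String) : List String :=
  let priority : List String := []
  -- if language and language in LANGUAGE_FILES: for f in LANGUAGE_FILES[language]: if f in files: priority.append(f)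
  let priority := match language with
    | none => priority
    | some s =>
      if !(s == "") && pvLANG.contains s then
        ((pvLANG.get? s).getD []).foldl
          (fun pr f => if files.contains f then pr ++ [f] else pr) priority
      else priority
  -- for f in UNIVERSAL_FILES: if f in files and f not in priority: priority.append(f)
  let priority := pvUNIV.foldl
    (fun pr f => if files.contains f && !(pr.contains f) then pr ++ [f] else pr) priority
  -- for f in files: if f not in priority: priority.append(f)
  let priority := files.foldl
    (fun pr f => if !(pr.contains f) then pr ++ [f] else pr) priority
  priority

-- ===== PORT B =====
-- lang_list = LANGUAGE_FILES.get(language, []) if language else []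
def pvLangList (language : Option String) : List String :=
  match language with
  | none => []
  | some s => if !(s == "") then (pvLANG.get? s).getD [] else []

def get_priority_files_py_alt (files : List String) (language : Option String) : List String :=
  let deduped := PySem.List.dedup files
  let langList : List String := pvLangList language
  let nL : Int := langList.length
  let nU : Int := pvUNIV.length
  -- for i, f in enumerate(deduped): … ranked.append((r, f))
  let ranked : List (Int × String) := (PySem.List.enumerate deduped 0).foldl
    (fun acc p =>
      acc ++ [((match PySem.List.index? langList p.2 with
        | some i => (i : Int)
        | none => match PySem.List.index? pvUNIV p.2 with
          | some j => nL + (j : Int)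
          | none => nL + nU + p.1), p.2)]) []
  -- ranked.sort(key=lambda p: p[0]); return [f for _, f in ranked]
  (PySem.List.sorted ranked (fun q => q.1) false).map (fun q => q.2)

-- ===== PRECONDITION & SPEC =====
def Spec_get_priority_files_py (files : List String) (language : Option String) (out : List String) : Prop := out = get_priority_files_py_alt files language
instance (files : List String) (language : Option String) (out : List String) : Decidable (Spec_get_priority_files_py files language out) := by unfold Spec_get_priority_files_py; infer_instance

-- ===== CLAIM (what is proved, stated in full; the proofs are below) =====
def Claim_equal_get_priority_files_py : Prop := ∀ (files : List String) (language : Option String), Dom_get_priority_files_py files language → Spec_get_priority_files_py files language (get_priority_files_py files language)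

-- ===== LEMMAS AND PROOFS =====

-- the rank key, phrased on a single file
def pvRk (files : List String) (language : Option String) (f : String) : Int :=
  match PySem.List.index? (pvLangList language) f with
  | some i => (i : Int)
  | none => match PySem.List.index? pvUNIV f with
    | some j => ((pvLangList language).length : Int) + (j : Int)
    | none => ((pvLangList language).length : Int) + (pvUNIV.length : Int)
              + ((PySem.List.dedup files).idxOf f : Int)

-- index? of a member is some idxOf
theorem pv_index?_mem {α : Type} [BEq α] [LawfulBEq α] (l : List α) (a : α) (h : a ∈ l) :
    PySem.List.index? l a = some (List.idxOf a l) := by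
  rw [PySem.List.index?_eq_idxOf?]
  induction l with
  | nil => simp at h
  | cons b l ih =>
    by_cases hb : b = a
    · subst hb; simp [List.idxOf?_cons]
    · have ha : a ∈ l := by simpa [Ne.symm hb] using h
      simp [List.idxOf?_cons, hb, ih ha]

-- a filter of a duplicate-free list is strictly increasing in idxOf
theorem pv_filter_pairwise {α : Type} [BEq α] [LawfulBEq α] (l : List α) (p : α → Bool)
    (h : l.Nodup) :
    (l.filter p).Pairwise (fun a b => List.idxOf a l < List.idxOf b l) := by
  have hp : l.Pairwise (fun a b => List.idxOf a l < List.idxOf b l) := by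
    rw [List.pairwise_iff_getElem]
    intro i j hi hj hij
    rw [h.idxOf_getElem i hi, h.idxOf_getElem j hj]
    exact hij
  exact hp.sublist (l.filter_sublist (p := p))

-- A's second loop: appending the not-yet-seen present universal files
theorem pv_loop2 (files : List String) (us : List String) :
    ∀ (pr : List String), us.Nodup → (∀ u ∈ us, u ∉ pr) →
    us.foldl (fun pr f => if files.contains f && !(pr.contains f) then pr ++ [f] else pr) pr
      = pr ++ us.filter (fun f => files.contains f) := by
  induction us with
  | nil => intro pr _ _; simp
  | cons u us ih =>
    intro pr hnd hdis
    have hu : pr.contains u = false := by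
      simpa using hdis u (by simp)
    have hnd' := hnd.of_cons
    have hun : u ∉ us := (List.nodup_cons.mp hnd).1
    cases hc : files.contains u with
    | false =>
      simp only [List.foldl_cons, hc, Bool.false_and, if_neg (by simp : ¬ (false = true))]
      rw [ih pr hnd' (fun v hv => hdis v (by simp [hv])), List.filter_cons, hc]
      simp
    | true =>
      simp only [List.foldl_cons, hc, hu, Bool.not_false, Bool.and_true, if_true]
      rw [ih (pr ++ [u]) hnd' ?_, List.filter_cons, hc]
      · simp
      · intro v hv
        have h1 : v ∉ pr := hdis v (by simp [hv])
        have h2 : v ≠ u := fun he => hun (he ▸ hv)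
        simp [h1, h2]

-- moving a duplicate-free sublist to the front is a permutation
theorem pv_perm_append_filter {α : Type} [BEq α] [LawfulBEq α] (D : List α) (hD : D.Nodup) :
    ∀ (S : List α), S.Nodup → (∀ x ∈ S, x ∈ D) →
    (S ++ D.filter (fun y => !(S.contains y))).Perm D := by
  intro S
  induction S with
  | nil => intro _ _; simp [List.filter_true]
  | cons s S ih =>
    intro hS hsub
    have hsS : s ∉ S := (List.nodup_cons.mp hS).1
    have hS' := hS.of_cons
    have hsub' : ∀ x ∈ S, x ∈ D := fun x hx => hsub x (by simp [hx])
    have hsD : s ∈ D := hsub s (by simp)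
    set F := D.filter (fun y => !(S.contains y)) with hF
    have hfil : D.filter (fun y => !((s :: S).contains y)) = F.filter (fun y => y != s) := by
      rw [hF, List.filter_filter]
      apply List.filter_congr
      intro y _
      by_cases hys : y = s
      · simp [hys]
      · simp [hys]
    have hsF : s ∈ F := by
      rw [hF, List.mem_filter]
      exact ⟨hsD, by simpa using hsS⟩
    have hFnd : F.Nodup := hD.filter _
    have h2 : F.erase s = F.filter (fun y => y != s) := hFnd.erase_eq_filter s
    have h1 : (s :: F.filter (fun y => y != s)).Perm F := by
      rw [← h2]; exact (List.perm_cons_erase hsF).symm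
    have hgoal : (s :: (S ++ F.filter (fun y => y != s))).Perm D :=
      (List.perm_middle.symm.trans (List.Perm.append_left S h1)).trans (ih hS' hsub')
    have : s :: S ++ D.filter (fun y => !((s :: S).contains y))
        = s :: (S ++ F.filter (fun y => y != s)) := by rw [hfil]; simp
    rw [this]
    exact hgoal

lemma pvLangList_good (language : Option String) :
    (pvLangList language).Nodup ∧ ∀ f ∈ pvLangList language, f ∉ pvUNIV := by
  match language with
  | none => simp [pvLangList]
  | some s =>
    unfold pvLangList
    by_cases hs : s = ""
    · simp [hs]
    · simp only []
      cases h : pvLANG.get? s with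
      | none => simp
      | some v =>
        simp only [pvLANG, PySem.Dict.get?_mk_cons] at h
        split_ifs at h <;>
          first
          | (injection h with h'; subst h';
             have hb : (s == "") = false := beq_eq_false_iff_ne.mpr hs;
             simp only [hb, Bool.not_false, if_true, Option.getD_some]; decide)
          | (exact absurd h (by exact fun hh => by cases hh))

-- A's result: language hits, then new universal hits, then the remaining dedup
lemma pv_A_eq (files : List String) (language : Option String) :
    get_priority_files_py files language
      = ((pvLangList language).filter (fun f => files.contains f)
          ++ pvUNIV.filter (fun f => files.contains f))
        ++ (PySem.List.dedup files).filter
            (fun y => !(((pvLangList language).filter (fun f => files.contains f)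
                ++ pvUNIV.filter (fun f => files.contains f)).contains y)) := by
  unfold get_priority_files_py
  have h1 : (match language with
      | none => ([] : List String)
      | some s =>
        if !(s == "") && pvLANG.contains s then
          ((pvLANG.get? s).getD []).foldl
            (fun pr f => if files.contains f then pr ++ [f] else pr) []
        else []) = (pvLangList language).filter (fun f => files.contains f) := by
    cases language with
    | none => simp [pvLangList]
    | some s =>
      by_cases hs : s = ""
      · simp [pvLangList, hs]
      · cases h : pvLANG.get? s with
        | none =>
          have hc : pvLANG.contains s = false := (PySem.Dict.get?_eq_none_iff_contains _ _).mp h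
          simp [pvLangList, hs, h, hc]
        | some v =>
          have hc : pvLANG.contains s = true := by
            cases hcc : pvLANG.contains s with
            | false => rw [(PySem.Dict.get?_eq_none_iff_contains _ _).mpr hcc] at h; cases h
            | true => rfl
          simp only [pvLangList, h, hc, Bool.and_true, Option.getD_some]
          rw [PySem.List.foldl_append_if_eq_filter (fun f => files.contains f) v []]
          simp [hs]
  dsimp only
  rw [h1]
  rw [pv_loop2 files pvUNIV _ (by decide) ?_]
  · set P := (pvLangList language).filter (fun f => files.contains f)
        ++ pvUNIV.filter (fun f => files.contains f) with hP
    have hstep : ∀ (pr : List String) (f : String), f ∈ files →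
        (if !(pr.contains f) then pr ++ [f] else pr) = PySem.Set.add pr f := by
      intro pr f _
      rw [PySem.Set.add_eq_ite]
      by_cases hf : f ∈ pr
      · simp [hf]
      · simp [hf]
    have h3 : files.foldl (fun pr f => if !(pr.contains f) then pr ++ [f] else pr) P
        = PySem.Set.update P files :=
      (PySem.List.foldl_congr_mem files _ _ P hstep).trans rfl
    rw [h3, PySem.Set.update_eq_append_filter]
    simp
  · intro u hu
    rw [List.mem_filter]
    rintro ⟨hul, -⟩
    exact (pvLangList_good language).2 u hul hu

-- rank of a language hit
lemma pv_rk_lang (files : List String) (language : Option String) (a : String)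
    (ha : a ∈ pvLangList language) :
    pvRk files language a = (List.idxOf a (pvLangList language) : Int) := by
  unfold pvRk
  rw [pv_index?_mem _ _ ha]

-- rank of a universal hit
lemma pv_rk_univ (files : List String) (language : Option String) (a : String)
    (ha : a ∉ pvLangList language) (hu : a ∈ pvUNIV) :
    pvRk files language a
      = ((pvLangList language).length : Int) + (List.idxOf a pvUNIV : Int) := by
  unfold pvRk
  rw [(PySem.List.index?_eq_none_iff _ _).mpr ha, pv_index?_mem _ _ hu]

-- rank of a remaining file
lemma pv_rk_rest (files : List String) (language : Option String) (a : String)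
    (ha : a ∉ pvLangList language) (hu : a ∉ pvUNIV) :
    pvRk files language a
      = ((pvLangList language).length : Int) + (pvUNIV.length : Int)
        + (List.idxOf a (PySem.List.dedup files) : Int) := by
  unfold pvRk
  rw [(PySem.List.index?_eq_none_iff _ _).mpr ha, (PySem.List.index?_eq_none_iff _ _).mpr hu]

-- ===== VERDICT (by name: the statement is the Claim_ definition above) =====
theorem get_priority_files_py_spec : Claim_equal_get_priority_files_py := by
  intro files language _
  unfold Spec_get_priority_files_py get_priority_files_py_alt
  dsimp only
  set ll := pvLangList language with hlldef
  set D := PySem.List.dedup files with hDdef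
  set pairF : String → Int × String := fun f => (pvRk files language f, f) with hpairF
  set g : Int × String → Int × String := fun p =>
    ((match PySem.List.index? ll p.2 with
      | some i => (i : Int)
      | none => match PySem.List.index? pvUNIV p.2 with
        | some j => (ll.length : Int) + (j : Int)
        | none => (ll.length : Int) + (pvUNIV.length : Int) + p.1), p.2) with hg
  have hD : D.Nodup := by rw [hDdef, PySem.List.dedup_eq_ofList]; exact PySem.Set.nodup_ofList files
  have hllnd : ll.Nodup := (pvLangList_good language).1
  have hdisj : ∀ f ∈ ll, f ∉ pvUNIV := (pvLangList_good language).2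
  have hUnd : pvUNIV.Nodup := by decide
  -- the ranked list is deduped mapped through the rank key
  have hfold : (PySem.List.enumerate D 0).foldl (fun acc p => acc ++ [g p]) [] = (PySem.List.enumerate D 0).map g :=
    (PySem.List.foldl_append_singleton_eq_map g _ []).trans (by simp)
  have hmap : (PySem.List.enumerate D 0).map g = D.map pairF := by
    apply List.ext_getElem
    · simp [PySem.List.length_enumerate]
    · intro k h1 h2
      rw [List.getElem_map, List.getElem_map, PySem.List.getElem_enumerate]
      have hk : k < D.length := by
        simpa [PySem.List.length_enumerate] using h1
      have hidx : List.idxOf D[k] D = k := hD.idxOf_getElem k hk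
      simp only [hg, hpairF]
      unfold pvRk
      rw [← hlldef, ← hDdef, hidx]
      cases hA : PySem.List.index? ll D[k] with
      | some i => rfl
      | none =>
        cases hB : PySem.List.index? pvUNIV D[k] with
        | some j => rfl
        | none => simp
  -- A's output
  rw [pv_A_eq files language]
  set p : String → Bool := fun f => files.contains f with hp
  set L := ll.filter p with hL
  set U := pvUNIV.filter p with hU
  set F := D.filter (fun y => !((L ++ U).contains y)) with hF
  have hmemfiles : ∀ a : String, p a = true ↔ a ∈ files := by
    intro a; rw [hp]; simp
  -- membership consequences
  have hmemL : ∀ a ∈ L, a ∈ ll := fun a ha => (List.mem_filter.mp ha).1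
  have hmemU : ∀ a ∈ U, a ∈ pvUNIV := fun a ha => (List.mem_filter.mp ha).1
  have hUnotll : ∀ a ∈ U, a ∉ ll := fun a ha hall => hdisj a hall (hmemU a ha)
  have hmemF : ∀ a ∈ F, a ∈ D ∧ a ∉ ll ∧ a ∉ pvUNIV := by
    intro a ha
    rcases List.mem_filter.mp ha with ⟨haD, hnc⟩
    have hnS : a ∉ L ++ U := by simpa using hnc
    have hpa : p a = true := (hmemfiles a).mpr ((PySem.List.mem_dedup files a).mp haD)
    refine ⟨haD, fun hall => hnS ?_, fun huniv => hnS ?_⟩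
    · exact List.mem_append_left _ (List.mem_filter.mpr ⟨hall, hpa⟩)
    · exact List.mem_append_right _ (List.mem_filter.mpr ⟨huniv, hpa⟩)
  -- the three rank bands
  have hrkL : ∀ a ∈ L, pvRk files language a = (List.idxOf a ll : Int) :=
    fun a ha => pv_rk_lang files language a (hmemL a ha)
  have hrkU : ∀ a ∈ U, pvRk files language a = (ll.length : Int) + (List.idxOf a pvUNIV : Int) :=
    fun a ha => pv_rk_univ files language a (hUnotll a ha) (hmemU a ha)
  have hrkF : ∀ a ∈ F, pvRk files language a
      = (ll.length : Int) + (pvUNIV.length : Int) + (List.idxOf a D : Int) :=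
    fun a ha => pv_rk_rest files language a (hmemF a ha).2.1 (hmemF a ha).2.2
  -- permutation
  have hLnd : L.Nodup := hllnd.filter p
  have hUndf : U.Nodup := hUnd.filter p
  have hSnd : (L ++ U).Nodup :=
    hLnd.append hUndf (fun a haL haU => hdisj a (hmemL a haL) (hmemU a haU))
  have hSsub : ∀ x ∈ L ++ U, x ∈ D := by
    intro x hx
    rw [hDdef, PySem.List.mem_dedup]
    rcases List.mem_append.mp hx with h | h
    · exact (hmemfiles x).mp (List.mem_filter.mp h).2
    · exact (hmemfiles x).mp (List.mem_filter.mp h).2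
  have hperm : ((L ++ U) ++ F).Perm D := by
    rw [hF]
    exact pv_perm_append_filter D hD (L ++ U) hSnd hSsub
  -- strict rank increase along A's output
  have hpw : ((L ++ U) ++ F).Pairwise
      (fun a b => pvRk files language a < pvRk files language b) := by
    rw [List.pairwise_append, List.pairwise_append]
    refine ⟨⟨?_, ?_, ?_⟩, ?_, ?_⟩
    · exact (pv_filter_pairwise ll p hllnd).imp_of_mem (fun {a b} ha hb hlt => by
        rw [hrkL a ha, hrkL b hb]; exact_mod_cast hlt)
    · exact (pv_filter_pairwise pvUNIV p hUnd).imp_of_mem (fun {a b} ha hb hlt => by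
        rw [hrkU a ha, hrkU b hb]; omega)
    · intro a ha b hb
      rw [hrkL a ha, hrkU b hb]
      have h1 : List.idxOf a ll < ll.length := List.idxOf_lt_length_of_mem (hmemL a ha)
      omega
    · exact (pv_filter_pairwise D _ hD).imp_of_mem (fun {a b} ha hb hlt => by
        rw [hrkF a ha, hrkF b hb]; omega)
    · intro a ha b hb
      have hbf := hrkF b hb
      rcases List.mem_append.mp ha with h | h
      · rw [hrkL a h, hbf]
        have h1 : List.idxOf a ll < ll.length := List.idxOf_lt_length_of_mem (hmemL a h)
        omega
      · rw [hrkU a h, hbf]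
        have h1 : List.idxOf a pvUNIV < pvUNIV.length := List.idxOf_lt_length_of_mem (hmemU a h)
        omega
  -- conclude via the characterisation of the stable sort
  have hsorted := PySem.List.sorted_eq_of_perm_of_pairwise_lt
      (D.map pairF) (((L ++ U) ++ F).map pairF) (fun q => q.1)
      (hperm.map pairF)
      ((List.pairwise_map).mpr (by
        refine hpw.imp ?_
        intro a b h
        simpa [hpairF] using h))
  rw [hfold, hmap, hsorted, List.map_map]
  simp [hpairF, Function.comp_def]
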